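-- pv_equiv track=rewrite | github.com/DESPEL/programacion-python | P1 sopa/utils.py | gen_regex_full
-- ===== SOURCE A (Python) =====
-- def gen_regex_full(s):
--     inside = False
--     regex = ''
--     for c in s:
--         if c == '.' and not inside:
--             regex += '.?'
--         elif c == '.' and inside:
--             regex += '.'
--         else:
--             regex += c
--             inside = True
--     delta = len(regex) - len(regex.rstrip('.'))
--     regex = regex.rstrip('.') + '.?'*delta
--     return '^' + regex + '$'
-- ===== SOURCE B (Python) =====
-- def gen_regex_full(s):
--     core = s.lstrip('.')
--     lead = len(s) - len(core)
--     mid = core.rstrip('.')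
--     trail = len(core) - len(mid)
--     return '^' + '.?' * lead + mid + '.?' * trail + '$'
-- ===== Notes on version B (the rewrite author's own statement) =====
-- stated objective: faster
-- what changed: Replaces the stateful char-by-char loop with a boolean flag (plus a post-hoc strip of the built pattern) by boundary arithmetic: strip the leading and trailing dot runs with lstrip/rstrip, keep the middle slice verbatim, and emit the optional-dot token repeated once per boundary dot.
import Mathlib
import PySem

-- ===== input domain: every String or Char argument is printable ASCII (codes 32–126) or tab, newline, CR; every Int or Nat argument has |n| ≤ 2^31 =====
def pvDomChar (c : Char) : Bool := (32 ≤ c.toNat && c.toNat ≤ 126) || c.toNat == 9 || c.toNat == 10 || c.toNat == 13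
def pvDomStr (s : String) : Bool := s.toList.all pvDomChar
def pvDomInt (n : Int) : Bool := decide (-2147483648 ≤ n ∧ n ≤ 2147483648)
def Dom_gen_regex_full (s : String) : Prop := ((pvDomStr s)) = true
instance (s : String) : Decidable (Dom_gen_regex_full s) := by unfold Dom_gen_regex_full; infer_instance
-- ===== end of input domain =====

-- B replaces A's stateful scan (an 'inside' flag plus a final rstrip of the built pattern)
-- by boundary arithmetic on the leading/trailing dot runs (measured faster: C-level strips vs per-char concatenation).

-- ===== PORT A =====
-- the for-loop over s with state (inside, regex)
def grLoopA : List Char → Bool → List Char → List Char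
  | [], _, regex => regex
  | c :: cs, inside, regex =>
    if c = '.' ∧ inside = false then grLoopA cs inside (regex ++ ['.', '?'])
    else if c = '.' ∧ inside = true then grLoopA cs inside (regex ++ ['.'])
    else grLoopA cs true (regex ++ [c])

def gen_regex_full (s : String) : String :=
  let regex := grLoopA s.toList false []
  -- regex.rstrip('.') ported by hand (exact): drop the trailing run of '.' characters
  let stripped := (regex.reverse.dropWhile (· = '.')).reverse
  let delta := regex.length - stripped.length
  -- '.?'*delta ported as flatten of delta copies (exact)
  String.ofList ('^' :: (stripped ++ (List.replicate delta (['.', '?'] : List Char)).flatten) ++ ['$'])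

-- ===== PORT B =====
def gen_regex_full_alt (s : String) : String :=
  -- s.lstrip('.') / core.rstrip('.') ported by hand (exact): drop the leading/trailing run of '.'
  let core := s.toList.dropWhile (· = '.')
  let lead := s.toList.length - core.length
  let mid := (core.reverse.dropWhile (· = '.')).reverse
  let trail := core.length - mid.length
  String.ofList ('^' :: ((List.replicate lead (['.', '?'] : List Char)).flatten
      ++ mid ++ (List.replicate trail (['.', '?'] : List Char)).flatten) ++ ['$'])

-- ===== PRECONDITION & SPEC =====
def Spec_gen_regex_full (s : String) (out : String) : Prop := out = gen_regex_full_alt s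
instance (s : String) (out : String) : Decidable (Spec_gen_regex_full s out) := by unfold Spec_gen_regex_full; infer_instance

-- ===== CLAIM (what is proved, stated in full; the proofs are below) =====
def Claim_equal_gen_regex_full : Prop := ∀ (s : String), Dom_gen_regex_full s → Spec_gen_regex_full s (gen_regex_full s)

-- ===== LEMMAS AND PROOFS =====

theorem grLoopA_acc (cs : List Char) (inside : Bool) (acc : List Char) :
    grLoopA cs inside acc = acc ++ grLoopA cs inside [] := by
  induction cs generalizing inside acc with
  | nil => simp [grLoopA]
  | cons c cs ih =>
    simp only [grLoopA]
    split_ifs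
    · rw [ih, ih _ ([] ++ ['.', '?'])]; simp
    · rw [ih, ih _ ([] ++ ['.'])]; simp
    · rw [ih, ih _ ([] ++ [c])]; simp

theorem grLoopA_true (cs : List Char) : grLoopA cs true [] = cs := by
  induction cs with
  | nil => rfl
  | cons c cs ih =>
    simp only [grLoopA]
    by_cases hc : c = '.'
    · rw [if_neg (by simp), if_pos (by simp [hc]), grLoopA_acc]
      simp [ih, hc]
    · rw [if_neg (by simp [hc]), if_neg (by simp [hc]), grLoopA_acc]
      simp [ih]

theorem grLoopA_false (cs : List Char) :
    grLoopA cs false [] =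
      (List.replicate (cs.takeWhile (· = '.')).length (['.', '?'] : List Char)).flatten
        ++ cs.dropWhile (· = '.') := by
  induction cs with
  | nil => rfl
  | cons c cs ih =>
    by_cases hc : c = '.'
    · simp only [grLoopA, hc]
      rw [if_pos (by simp), grLoopA_acc, ih]
      simp [List.replicate_succ]
    · simp only [grLoopA]
      rw [if_neg (by simp [hc]), if_neg (by simp [hc]), grLoopA_acc, grLoopA_true]
      simp [hc]

-- the flattened '.?'-run never ends in '.'
theorem rep_reverse_dropWhile (n : Nat) :
    ((List.replicate n (['.', '?'] : List Char)).flatten).reverse.dropWhile (· = '.')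
      = ((List.replicate n (['.', '?'] : List Char)).flatten).reverse := by
  induction n with
  | zero => rfl
  | succ m ih =>
    rw [List.replicate_succ, List.flatten_cons, List.reverse_append, List.dropWhile_append, ih]
    by_cases h : ((List.replicate m (['.', '?'] : List Char)).flatten.reverse).isEmpty = true
    · rw [if_pos h, List.isEmpty_iff.mp h]
      simp
    · rw [if_neg h]

theorem dropWhile_head_false {α : Type} {p : α → Bool} (cs : List α) (d : α) (core' : List α)
    (h : cs.dropWhile p = d :: core') : p d = false := by
  induction cs with
  | nil => simp [List.dropWhile] at h
  | cons a l ih =>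
    rw [List.dropWhile_cons] at h
    by_cases hp : p a = true
    · exact ih (by rwa [if_pos hp] at h)
    · rw [if_neg hp] at h
      cases h
      simpa using hp

theorem gen_regex_full_eq (s : String) : gen_regex_full s = gen_regex_full_alt s := by
  unfold gen_regex_full gen_regex_full_alt
  simp only
  rw [grLoopA_false]
  have hlen : s.toList.length
      = (s.toList.takeWhile (· = '.')).length + (s.toList.dropWhile (· = '.')).length := by
    rw [← List.length_append, List.takeWhile_append_dropWhile]
  rcases hc : s.toList.dropWhile (· = '.') with _ | ⟨d, core'⟩
  · rw [hc] at hlen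
    rw [List.append_nil, rep_reverse_dropWhile, List.reverse_reverse]
    have h0 : s.toList.length - ([] : List Char).length
        = (s.toList.takeWhile (· = '.')).length := by simp at hlen ⊢; omega
    rw [h0]
    simp
  · have hd : d ≠ '.' := by simpa using dropWhile_head_false _ _ _ hc
    rw [hc] at hlen
    have hne : ¬ (((d :: core').reverse.dropWhile (· = '.')).isEmpty = true) := by
      simp only [List.isEmpty_iff, List.dropWhile_eq_nil_iff]
      intro h
      exact absurd (by simpa using h d (by simp)) hd
    rw [List.reverse_append, List.dropWhile_append, if_neg hne, List.reverse_append,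
      List.reverse_reverse]
    have hML : ((d :: core').reverse.dropWhile (· = '.')).length ≤ (d :: core').length := by
      calc ((d :: core').reverse.dropWhile (· = '.')).length
          ≤ (d :: core').reverse.length := List.length_dropWhile_le _ _
        _ = (d :: core').length := List.length_reverse
    have hdelta :
        ((List.replicate (s.toList.takeWhile (· = '.')).length (['.', '?'] : List Char)).flatten
            ++ d :: core').length -
          ((List.replicate (s.toList.takeWhile (· = '.')).length
              (['.', '?'] : List Char)).flatten
            ++ ((d :: core').reverse.dropWhile (· = '.')).reverse).length
        = (d :: core').length
            - (((d :: core').reverse.dropWhile (· = '.')).reverse).length := by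
      simp only [List.length_append, List.length_reverse]
      omega
    rw [hdelta]
    have hlead : s.toList.length - (d :: core').length
        = (s.toList.takeWhile (· = '.')).length := by omega
    rw [hlead]

-- ===== VERDICT (by name: the statement is the Claim_ definition above) =====
theorem gen_regex_full_spec : Claim_equal_gen_regex_full := by
  intro s _
  unfold Spec_gen_regex_full
  exact gen_regex_full_eq s
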